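-- pv_equiv track=rewrite | github.com/malcolmwhat/project-euler | ProjectEuler/05smallest_multiple.py | get_initial_product
-- ===== SOURCE A (Python) =====
-- def multiple_in_list(int_in, list_in):
--     """
--     Checks if int_in is a factor of any of the elements of list_in.
--     """
--     for i in list_in:
--         if i % int_in == 0:
--             return True
--
--     return False
--
-- def get_initial_product(max_divisor):
--     """
--     This calculates max_divisor factorial but excludes factors that are factors of
--     larger factors.
--
--     Ex: get_initial_product(5) -> 5*4*3*skip 2, since 2 is factor
--     of 4, skip 1, since it's a factor of 5.
--     """
--     reduced_factors = []
--     for i in range(max_divisor, 0, -1):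
--         #Check if there is a multiple of the current value (i) in the list
--         if not multiple_in_list(i, reduced_factors):
--             #if not, then add the current value to the list
--             reduced_factors.append(i)
--
--     #Now we have a list of independant factors, multiply them
--     initial_product = 1
--     for i in reduced_factors:
--         initial_product *= i # *= -> similar to += operator, but with *
--
--     return initial_product
-- ===== SOURCE B (Python) =====
-- def get_initial_product(max_divisor):
--     # Closed-form characterization: a value i is kept exactly when 2*i > max_divisor
--     # (every i <= max_divisor//2 divides its largest multiple <= max_divisor, which is kept).
--     product = 1
--     for i in range(max_divisor // 2 + 1, max_divisor + 1):
--         product *= i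
--     return product
-- ===== Notes on version B (the rewrite author's own statement) =====
-- stated objective: faster
-- what changed: Replaced the quadratic kept-list scan (for each i, test divisibility against every previously kept number) by the closed-form characterization that exactly the numbers in (max_divisor//2, max_divisor] are kept, multiplying them in one linear pass.
import Mathlib
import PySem

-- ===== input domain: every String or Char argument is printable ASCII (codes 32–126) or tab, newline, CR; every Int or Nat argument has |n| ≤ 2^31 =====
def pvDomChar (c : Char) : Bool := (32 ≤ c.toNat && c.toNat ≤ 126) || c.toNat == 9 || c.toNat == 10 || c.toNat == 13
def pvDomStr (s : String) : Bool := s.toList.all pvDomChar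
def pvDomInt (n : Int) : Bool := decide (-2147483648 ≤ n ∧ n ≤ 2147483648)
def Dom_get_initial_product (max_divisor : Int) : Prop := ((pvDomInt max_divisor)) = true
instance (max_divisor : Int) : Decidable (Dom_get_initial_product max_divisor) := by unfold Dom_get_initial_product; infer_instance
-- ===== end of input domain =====

-- B replaces A's quadratic kept-list divisibility scan by the closed form
-- "the kept numbers are exactly (max_divisor//2, max_divisor]" (faster).

-- ===== PORT A =====
def multiple_in_list (int_in : Int) (list_in : List Int) : Bool :=
  match list_in with
  | [] => false
  | i :: rest =>
    if PySem.Int.mod i int_in == 0 then true else multiple_in_list int_in rest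

def get_initial_product (max_divisor : Int) : Int :=
  let reduced_factors :=
    (PySem.List.pyRange max_divisor 0 (-1)).foldl
      (fun acc i => if !(multiple_in_list i acc) then acc ++ [i] else acc) []
  reduced_factors.foldl (fun p i => p * i) 1

-- ===== PORT B =====
def get_initial_product_alt (max_divisor : Int) : Int :=
  (PySem.List.pyRange (PySem.Int.floordiv max_divisor 2 + 1) (max_divisor + 1) 1).foldl
    (fun p i => p * i) 1

-- ===== PRECONDITION & SPEC =====
def Spec_get_initial_product (max_divisor : Int) (out : Int) : Prop := out = get_initial_product_alt max_divisor
instance (max_divisor : Int) (out : Int) : Decidable (Spec_get_initial_product max_divisor out) := by unfold Spec_get_initial_product; infer_instance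

-- ===== CLAIM (what is proved, stated in full; the proofs are below) =====
def Claim_equal_get_initial_product : Prop := ∀ (max_divisor : Int), Dom_get_initial_product max_divisor → Spec_get_initial_product max_divisor (get_initial_product max_divisor)

-- ===== LEMMAS AND PROOFS =====

lemma mil_true_iff (n : Int) (l : List Int) :
    multiple_in_list n l = true ↔ ∃ k ∈ l, PySem.Int.mod k n = 0 := by
  induction l with
  | nil => simp [multiple_in_list]
  | cons i rest ih =>
    simp only [multiple_in_list]
    by_cases h : PySem.Int.mod i n = 0
    · simp [h]
    · simp [h, ih]

-- A's loop step, named for the proofs (the same lambda as in the port).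
def pvStep (acc : List Int) (i : Int) : List Int :=
  if !(multiple_in_list i acc) then acc ++ [i] else acc

lemma countdown_append_singleton (m hi : Int) (h1 : hi ≤ m) :
    PySem.List.pyRange m hi (-1) ++ [hi] = PySem.List.pyRange m (hi - 1) (-1) := by
  rw [PySem.List.pyRange_neg_one_eq_reverse, PySem.List.pyRange_neg_one_eq_reverse]
  have : hi - 1 + 1 = hi := by omega
  rw [this, PySem.List.pyRange_one_cons (by omega : hi < m + 1)]
  simp

lemma countdown_split (m h : Int) (h0 : 0 ≤ h) (h1 : h ≤ m) :
    PySem.List.pyRange m 0 (-1) =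
      PySem.List.pyRange m h (-1) ++ PySem.List.pyRange h 0 (-1) := by
  rw [PySem.List.pyRange_neg_one_eq_reverse, PySem.List.pyRange_neg_one_eq_reverse,
      PySem.List.pyRange_neg_one_eq_reverse, zero_add,
      PySem.List.pyRange_one_append 1 (h + 1) (m + 1) (by omega) (by omega)]
  simp

-- In the top phase (i > m//2) nothing in the accumulator is a multiple of i, so i is appended.
lemma top_phase (m : Int) (hm : 0 < m) :
    ∀ (n : Nat) (hi : Int), PySem.Int.floordiv m 2 ≤ hi → hi ≤ m →
      (hi - PySem.Int.floordiv m 2).toNat = n →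
      (PySem.List.pyRange hi (PySem.Int.floordiv m 2) (-1)).foldl pvStep
        (PySem.List.pyRange m hi (-1)) =
      PySem.List.pyRange m (PySem.Int.floordiv m 2) (-1) := by
  have hdm := PySem.Int.floordiv_mul_add_mod m 2
  have hm0 := PySem.Int.mod_nonneg m (by omega : (0:Int) < 2)
  have hm2 := PySem.Int.mod_lt m (by omega : (0:Int) < 2)
  set h := PySem.Int.floordiv m 2 with hh
  intro n
  induction n with
  | zero =>
    intro hi hlo hhi hn
    have : hi = h := by omega
    subst this
    rw [show PySem.List.pyRange h h (-1) = [] from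
      PySem.List.pyRange_neg_one_eq_nil (le_refl h)]
    rfl
  | succ n ih =>
    intro hi hlo hhi hn
    have hgt : h < hi := by omega
    rw [PySem.List.pyRange_neg_one_cons hgt]
    have hmil : multiple_in_list hi (PySem.List.pyRange m hi (-1)) = false := by
      rw [Bool.eq_false_iff]
      intro hc
      obtain ⟨k, hk, hkmod⟩ := (mil_true_iff _ _).mp hc
      rw [PySem.List.mem_pyRange_neg_one] at hk
      rw [PySem.Int.mod_eq_zero_iff_dvd] at hkmod
      obtain ⟨c, hc'⟩ := hkmod
      -- hi < k ≤ m < 2*hi, yet k = hi * c : impossible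
      have hhi0 : 0 < hi := by omega
      have hk2 : k < 2 * hi := by omega
      have hc1 : 1 < c := by nlinarith
      nlinarith
    rw [List.foldl_cons]
    have : pvStep (PySem.List.pyRange m hi (-1)) hi
        = PySem.List.pyRange m (hi - 1) (-1) := by
      rw [pvStep, hmil]
      simp only [Bool.not_false, if_pos]
      exact countdown_append_singleton m hi hhi
    rw [this]
    exact ih (hi - 1) (by omega) (by omega) (by omega)

-- In the bottom phase (1 ≤ i ≤ m//2) the largest multiple of i not exceeding m is
-- already kept, so the accumulator never changes.
lemma bot_phase (m : Int) (_hm : 0 < m) :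
    ∀ (n : Nat) (lo : Int), 0 ≤ lo → lo ≤ PySem.Int.floordiv m 2 → lo.toNat = n →
      (PySem.List.pyRange lo 0 (-1)).foldl pvStep
        (PySem.List.pyRange m (PySem.Int.floordiv m 2) (-1)) =
      PySem.List.pyRange m (PySem.Int.floordiv m 2) (-1) := by
  have hdm := PySem.Int.floordiv_mul_add_mod m 2
  have hm0 := PySem.Int.mod_nonneg m (by omega : (0:Int) < 2)
  have hm2 := PySem.Int.mod_lt m (by omega : (0:Int) < 2)
  set h := PySem.Int.floordiv m 2 with hh
  intro n
  induction n with
  | zero =>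
    intro lo h0 hlh hn
    have : lo = 0 := by omega
    subst this
    rw [show PySem.List.pyRange 0 0 (-1) = [] from
      PySem.List.pyRange_neg_one_eq_nil (le_refl 0)]
    rfl
  | succ n ih =>
    intro lo h0 hlh hn
    have hgt : (0:Int) < lo := by omega
    rw [PySem.List.pyRange_neg_one_cons hgt]
    have hlo0 : (0:Int) < lo := hgt
    -- the witness multiple: (m // lo) * lo = m - m % lo
    have hdl := PySem.Int.floordiv_mul_add_mod m lo
    have hl0 := PySem.Int.mod_nonneg m hlo0
    have hl2 := PySem.Int.mod_lt m hlo0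
    have hmil : multiple_in_list lo (PySem.List.pyRange m h (-1)) = true := by
      rw [mil_true_iff]
      refine ⟨PySem.Int.floordiv m lo * lo, ?_, ?_⟩
      · rw [PySem.List.mem_pyRange_neg_one]
        omega
      · rw [PySem.Int.mod_eq_zero_iff_dvd]
        exact dvd_mul_left lo (PySem.Int.floordiv m lo)
    rw [List.foldl_cons]
    have : pvStep (PySem.List.pyRange m h (-1)) lo = PySem.List.pyRange m h (-1) := by
      rw [pvStep, hmil]
      rfl
    rw [this]
    exact ih (lo - 1) (by omega) (by omega) (by omega)

lemma foldl_mul_eq_prod (l : List Int) : l.foldl (fun p i => p * i) 1 = l.prod := by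
  rw [List.prod_eq_foldl]

theorem get_initial_product_spec_aux (m : Int) :
    get_initial_product m = get_initial_product_alt m := by
  have hdm := PySem.Int.floordiv_mul_add_mod m 2
  have hm0 := PySem.Int.mod_nonneg m (by omega : (0:Int) < 2)
  have hm2 := PySem.Int.mod_lt m (by omega : (0:Int) < 2)
  set h := PySem.Int.floordiv m 2 with hh
  by_cases hm : m ≤ 0
  · -- both loops are empty
    show ((PySem.List.pyRange m 0 (-1)).foldl pvStep []).foldl (fun p i => p * i) 1
        = (PySem.List.pyRange (h + 1) (m + 1) 1).foldl (fun p i => p * i) 1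
    rw [PySem.List.pyRange_neg_one_eq_nil hm,
        PySem.List.pyRange_one_eq_nil (by omega : m + 1 ≤ h + 1)]
    rfl
  · have hm' : 0 < m := by omega
    have hcore :
        (PySem.List.pyRange m 0 (-1)).foldl pvStep [] = PySem.List.pyRange m h (-1) := by
      rw [countdown_split m h (by omega) (by omega), List.foldl_append]
      have htop := top_phase m hm' (m - h).toNat m (by omega) (by omega) rfl
      rw [show PySem.List.pyRange m m (-1) = [] from
        PySem.List.pyRange_neg_one_eq_nil (le_refl m)] at htop
      rw [htop]
      exact bot_phase m hm' h.toNat h (by omega) (by omega) rfl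
    show ((PySem.List.pyRange m 0 (-1)).foldl pvStep []).foldl (fun p i => p * i) 1
        = (PySem.List.pyRange (h + 1) (m + 1) 1).foldl (fun p i => p * i) 1
    rw [hcore, foldl_mul_eq_prod, foldl_mul_eq_prod,
        PySem.List.pyRange_neg_one_eq_reverse, List.prod_reverse]

-- ===== VERDICT (by name: the statement is the Claim_ definition above) =====
theorem get_initial_product_spec : Claim_equal_get_initial_product := by
  intro m _
  exact get_initial_product_spec_aux m
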